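-- pv_equiv track=rewrite | github.com/yzx107/hk_factor_autoresearch | dashboard/research_dashboard_app.py | _find_best_comparison
-- ===== SOURCE A (Python) =====
-- from typing import Any
--
-- def _find_best_comparison(
--     left_factor: dict[str, Any],
--     right_factor: dict[str, Any],
--     comparison_catalog: list[dict[str, Any]],
-- ) -> tuple[dict[str, Any] | None, str | None]:
--     left_experiment = left_factor.get("experiment_id", "")
--     right_experiment = right_factor.get("experiment_id", "")
--     exact_matches = []
--     factor_matches = []
--     for entry in comparison_catalog:
--         experiments = {entry.get("left_experiment_id", ""), entry.get("right_experiment_id", "")}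
--         factors = {entry.get("left_factor_name", ""), entry.get("right_factor_name", "")}
--         if experiments == {left_experiment, right_experiment}:
--             exact_matches.append(entry)
--         elif factors == {left_factor.get("factor_name", ""), right_factor.get("factor_name", "")}:
--             factor_matches.append(entry)
--     if exact_matches:
--         return exact_matches[0], "精确实验匹配（Exact Experiment Match）"
--     if factor_matches:
--         return factor_matches[0], "因子名匹配（Factor Name Match）"
--     return None, None
-- ===== SOURCE B (Python) =====
-- def _find_best_comparison(left_factor, right_factor, comparison_catalog):
--     target_experiments = {left_factor.get("experiment_id", ""), right_factor.get("experiment_id", "")}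
--     for entry in comparison_catalog:
--         if {entry.get("left_experiment_id", ""), entry.get("right_experiment_id", "")} == target_experiments:
--             return entry, "精确实验匹配（Exact Experiment Match）"
--     target_factors = {left_factor.get("factor_name", ""), right_factor.get("factor_name", "")}
--     for entry in comparison_catalog:
--         if {entry.get("left_factor_name", ""), entry.get("right_factor_name", "")} == target_factors:
--             return entry, "因子名匹配（Factor Name Match）"
--     return None, None
-- ===== Notes on version B (the rewrite author's own statement) =====
-- stated objective: simpler
-- what changed: Replaces the single loop that partitions the catalog into two match lists (then inspects their heads) with two priority-ordered short-circuiting scans that return the first exact-experiment match and otherwise the first factor-name match.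
import Mathlib
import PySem

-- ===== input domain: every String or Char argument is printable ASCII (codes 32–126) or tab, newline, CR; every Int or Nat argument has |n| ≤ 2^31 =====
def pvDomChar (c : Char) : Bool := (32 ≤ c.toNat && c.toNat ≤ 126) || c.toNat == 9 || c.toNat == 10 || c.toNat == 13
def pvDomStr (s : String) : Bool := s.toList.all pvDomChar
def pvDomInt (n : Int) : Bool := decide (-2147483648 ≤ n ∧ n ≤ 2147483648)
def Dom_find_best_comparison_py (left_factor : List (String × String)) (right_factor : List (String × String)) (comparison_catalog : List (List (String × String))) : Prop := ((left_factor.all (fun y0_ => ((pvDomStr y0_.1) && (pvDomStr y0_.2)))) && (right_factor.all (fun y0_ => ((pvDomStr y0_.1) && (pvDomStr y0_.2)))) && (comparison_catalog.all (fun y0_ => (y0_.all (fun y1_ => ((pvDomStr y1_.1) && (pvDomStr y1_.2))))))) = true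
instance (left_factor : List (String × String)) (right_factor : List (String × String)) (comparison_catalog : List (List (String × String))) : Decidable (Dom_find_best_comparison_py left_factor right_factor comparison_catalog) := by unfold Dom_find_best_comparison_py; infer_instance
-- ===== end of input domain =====

-- B replaces A's single partition-into-two-lists loop (then head inspection) by two
-- priority-ordered short-circuiting scans; same O(n) cost, simpler control flow.

-- Shared helpers: Python's two-element set equality {a, b} == {c, d}, and the two
-- match conditions both Python versions test on a catalog entry.
def pvSetEq (a b c d : String) : Bool :=
  (a == c && b == d) || (a == d && b == c)

def pvExperimentsMatch (left_factor right_factor entry : List (String × String)) : Bool :=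
  pvSetEq (PySem.Dict.getD (PySem.Dict.mk entry) "left_experiment_id" "")
          (PySem.Dict.getD (PySem.Dict.mk entry) "right_experiment_id" "")
          (PySem.Dict.getD (PySem.Dict.mk left_factor) "experiment_id" "")
          (PySem.Dict.getD (PySem.Dict.mk right_factor) "experiment_id" "")

def pvFactorsMatch (left_factor right_factor entry : List (String × String)) : Bool :=
  pvSetEq (PySem.Dict.getD (PySem.Dict.mk entry) "left_factor_name" "")
          (PySem.Dict.getD (PySem.Dict.mk entry) "right_factor_name" "")
          (PySem.Dict.getD (PySem.Dict.mk left_factor) "factor_name" "")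
          (PySem.Dict.getD (PySem.Dict.mk right_factor) "factor_name" "")

-- ===== PORT A =====
def find_best_comparison_py (left_factor : List (String × String)) (right_factor : List (String × String)) (comparison_catalog : List (List (String × String))) : (Option (List (String × String))) × Option String :=
  -- single loop partitioning into exact_matches / factor_matches (elif), then head inspection
  let acc := comparison_catalog.foldl
    (fun (acc : List (List (String × String)) × List (List (String × String))) entry =>
      if pvExperimentsMatch left_factor right_factor entry then
        (acc.1 ++ [entry], acc.2)
      else if pvFactorsMatch left_factor right_factor entry then
        (acc.1, acc.2 ++ [entry])
      else acc)
    ([], [])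
  match acc.1 with
  | e :: _ => (some e, some "精确实验匹配（Exact Experiment Match）")
  | [] =>
    match acc.2 with
    | e :: _ => (some e, some "因子名匹配（Factor Name Match）")
    | [] => (none, none)

-- ===== PORT B =====
def find_best_comparison_py_alt (left_factor : List (String × String)) (right_factor : List (String × String)) (comparison_catalog : List (List (String × String))) : (Option (List (String × String))) × Option String :=
  -- two priority-ordered short-circuiting scans
  match comparison_catalog.find? (pvExperimentsMatch left_factor right_factor) with
  | some e => (some e, some "精确实验匹配（Exact Experiment Match）")
  | none =>
    match comparison_catalog.find? (pvFactorsMatch left_factor right_factor) with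
    | some e => (some e, some "因子名匹配（Factor Name Match）")
    | none => (none, none)

-- ===== PRECONDITION & SPEC =====
def Spec_find_best_comparison_py (left_factor : List (String × String)) (right_factor : List (String × String)) (comparison_catalog : List (List (String × String))) (out : (Option (List (String × String))) × Option String) : Prop := out = find_best_comparison_py_alt left_factor right_factor comparison_catalog
instance (left_factor : List (String × String)) (right_factor : List (String × String)) (comparison_catalog : List (List (String × String))) (out : (Option (List (String × String))) × Option String) : Decidable (Spec_find_best_comparison_py left_factor right_factor comparison_catalog out) := by unfold Spec_find_best_comparison_py; infer_instance

-- ===== CLAIM (what is proved, stated in full; the proofs are below) =====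
def Claim_equal_find_best_comparison_py : Prop := ∀ (left_factor : List (String × String)) (right_factor : List (String × String)) (comparison_catalog : List (List (String × String))), Dom_find_best_comparison_py left_factor right_factor comparison_catalog → Spec_find_best_comparison_py left_factor right_factor comparison_catalog (find_best_comparison_py left_factor right_factor comparison_catalog)

-- ===== LEMMAS AND PROOFS =====

-- A's loop partitions the catalog: the two accumulated lists are filters of the catalog.
theorem pv_foldl_partition {α : Type} (P Q : α → Bool) (l : List α) (accE accF : List α) :
    l.foldl
      (fun (acc : List α × List α) e =>
        if P e then (acc.1 ++ [e], acc.2)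
        else if Q e then (acc.1, acc.2 ++ [e])
        else acc)
      (accE, accF)
    = (accE ++ l.filter P, accF ++ l.filter (fun e => !P e && Q e)) := by
  induction l generalizing accE accF with
  | nil => simp
  | cons x xs ih =>
    by_cases hP : P x
    · simp [List.foldl_cons, hP, ih]
    · by_cases hQ : Q x
      · simp [List.foldl_cons, hP, hQ, ih]
      · simp [List.foldl_cons, hP, hQ, ih]

-- B's short-circuiting scan returns the head of A's corresponding filter.
theorem pv_find?_eq_head?_filter {α : Type} (p : α → Bool) (l : List α) :
    l.find? p = (l.filter p).head? := by
  induction l with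
  | nil => rfl
  | cons x xs ih =>
    by_cases h : p x
    · rw [List.find?_cons_of_pos h, List.filter_cons_of_pos h]
      rfl
    · rw [List.find?_cons_of_neg h, List.filter_cons_of_neg h, ih]

-- ===== VERDICT (by name: the statement is the Claim_ definition above) =====
theorem find_best_comparison_py_spec : Claim_equal_find_best_comparison_py := by
  intro lf rf cat _
  unfold Spec_find_best_comparison_py find_best_comparison_py find_best_comparison_py_alt
  rw [pv_foldl_partition (pvExperimentsMatch lf rf) (pvFactorsMatch lf rf) cat [] [],
      pv_find?_eq_head?_filter, pv_find?_eq_head?_filter]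
  simp only [List.nil_append]
  cases hE : cat.filter (pvExperimentsMatch lf rf) with
  | cons e es => simp
  | nil =>
    -- no entry is an exact match, so A's elif-filter coincides with the plain factor filter
    have hnone : ∀ x ∈ cat, pvExperimentsMatch lf rf x = false := by
      intro x hx
      by_contra h
      have : x ∈ cat.filter (pvExperimentsMatch lf rf) :=
        List.mem_filter.2 ⟨hx, by revert h; cases pvExperimentsMatch lf rf x <;> simp⟩
      simp [hE] at this
    have hfilter : cat.filter (fun e => !pvExperimentsMatch lf rf e && pvFactorsMatch lf rf e)
        = cat.filter (pvFactorsMatch lf rf) := by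
      apply List.filter_congr
      intro x hx
      simp [hnone x hx]
    rw [hfilter]
    cases cat.filter (pvFactorsMatch lf rf) <;> simp
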